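-- pv_equiv track=rewrite | github.com/blueroutecn/Algorithm | Divide_and_Conquer/QUADTREE_submit.py | FlipTree
-- ===== SOURCE A (Python) =====
-- def FlipTree(tree,idx):
--     if tree[idx] != 'x':
--         return (idx + 1),tree[idx]
--
--     fliplist = {}
--     idx = idx + 1
--     for i in range(0,4):
--         idx,fliped = FlipTree(tree,idx)
--         fliplist[i] = fliped
--
--     fliped = fliplist[2] + fliplist[3] + fliplist[0] + fliplist[1]
--     fliped = 'x' + fliped
--     return idx,fliped
-- ===== SOURCE B (Python) =====
-- def FlipTree(tree, idx):
--     # Iterative prefix parse with an explicit stack of partial 'x'-frames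
--     # instead of recursion.
--     stack = []
--     while True:
--         c = tree[idx]
--         idx += 1
--         if c == 'x':
--             stack.append([])
--             continue
--         s = c
--         while stack and len(stack[-1]) == 3:
--             f = stack.pop()
--             f.append(s)
--             s = 'x' + f[2] + f[3] + f[0] + f[1]
--         if not stack:
--             return idx, s
--         stack[-1].append(s)
-- ===== Notes on version B (the rewrite author's own statement) =====
-- stated objective: alternative
-- what changed: Replaced the recursive prefix parser by an iterative single loop over the characters with an explicit stack of partial 4-child frames (completed subtrees are attached by popping full frames).
import Mathlib
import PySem

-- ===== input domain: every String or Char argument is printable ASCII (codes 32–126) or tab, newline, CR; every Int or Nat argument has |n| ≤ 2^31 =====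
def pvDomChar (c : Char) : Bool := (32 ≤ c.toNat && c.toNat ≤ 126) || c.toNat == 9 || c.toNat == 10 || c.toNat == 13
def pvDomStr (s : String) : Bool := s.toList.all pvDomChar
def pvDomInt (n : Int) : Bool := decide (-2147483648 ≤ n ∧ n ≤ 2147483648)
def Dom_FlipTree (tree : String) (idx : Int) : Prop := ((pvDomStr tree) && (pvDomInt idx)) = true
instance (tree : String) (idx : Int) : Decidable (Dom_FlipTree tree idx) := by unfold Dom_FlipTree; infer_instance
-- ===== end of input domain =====

-- B replaces A's recursive prefix parse by an iterative loop with an explicit stack of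
-- partial frames (different decomposition, same exact return value). Objective: alternative.

-- ===== PORT A =====
-- A's recursion terminates because the index strictly increases; fuel 2*len+1 bounds the
-- recursion depth (≤ characters consumed ≤ 2*len on any returning input, see Pre_ below).
def pvHelperA : Nat → String → Int → Option (Int × String)
  | 0, _, _ => none
  | f+1, t, i =>
    (PySem.Str.pyGet? t i).bind fun c =>          -- IndexError ⇒ none
      if c ≠ 'x' then some (i + 1, String.ofList [c])
      else
        (pvHelperA f t (i+1)).bind fun p0 =>      -- child 0
        (pvHelperA f t p0.1).bind fun p1 =>       -- child 1
        (pvHelperA f t p1.1).bind fun p2 =>       -- child 2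
        (pvHelperA f t p2.1).bind fun p3 =>       -- child 3
        some (p3.1, "x" ++ (p2.2 ++ p3.2 ++ p0.2 ++ p1.2))

def FlipTree (tree : String) (idx : Int) : Int × String :=
  (pvHelperA (2 * tree.length + 1) tree idx).getD (0, "")

-- ===== PORT B =====
-- attach a completed subtree string to the stack of partial frames, popping full frames
def pvAttachB : String → List (List String) → String ⊕ List (List String)
  | s, [] => Sum.inl s
  | s, frame :: rest =>
    match frame with
    | [a, b, c] => pvAttachB ("x" ++ (c ++ s ++ a ++ b)) rest
    | _ => Sum.inr ((frame ++ [s]) :: rest)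

def pvLoopB : Nat → String → Int → List (List String) → Option (Int × String)
  | 0, _, _, _ => none
  | f+1, t, i, stack =>
    (PySem.Str.pyGet? t i).bind fun c =>          -- IndexError ⇒ none
      if c = 'x' then pvLoopB f t (i+1) ([] :: stack)
      else
        match pvAttachB (String.ofList [c]) stack with
        | Sum.inl s => some (i + 1, s)
        | Sum.inr st => pvLoopB f t (i+1) st

def FlipTree_alt (tree : String) (idx : Int) : Int × String :=
  (pvLoopB (2 * tree.length + 1) tree idx []).getD (0, "")

-- ===== PRECONDITION & SPEC =====
-- weight of one scanned character: an 'x' needs 4 children (net +3 pending subtrees), a leaf closes one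
def pvW (o : Option Char) : Int := match o with | some c => if c = 'x' then 3 else -1 | none => 0
def pvS (t : String) (i : Int) (m : Nat) : Int :=
  ∑ x ∈ Finset.range m, pvW (PySem.Str.pyGet? t (i + (x : Int)))

-- Pre_ = exactly the inputs on which A returns (no IndexError): some prefix of n readable
-- characters from idx is a complete tree — pending-subtree count 1 + Σ weights stays positive
-- on every proper prefix and hits 0 at n.
def Pre_FlipTree (tree : String) (idx : Int) : Prop :=
  ∃ n : Nat, n < 2 * tree.length + 1 ∧
    (∀ m : Nat, m < n → (PySem.Str.pyGet? tree (idx + (m : Int))).isSome = true) ∧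
    (∀ m : Nat, m < n → 0 < 1 + pvS tree idx m) ∧
    1 + pvS tree idx n = 0

instance (tree : String) (idx : Int) : Decidable (Pre_FlipTree tree idx) := by
  unfold Pre_FlipTree; infer_instance

def pvWitness_FlipTree : String × Int := ("xabcd", 0)

def Spec_FlipTree (tree : String) (idx : Int) (out : Int × String) : Prop := out = FlipTree_alt tree idx
instance (tree : String) (idx : Int) (out : Int × String) : Decidable (Spec_FlipTree tree idx out) := by unfold Spec_FlipTree; infer_instance

-- ===== CLAIM (what is proved, stated in full; the proofs are below) =====
def Claim_equal_FlipTree : Prop := ∀ (tree : String) (idx : Int), Dom_FlipTree tree idx → Pre_FlipTree tree idx → Spec_FlipTree tree idx (FlipTree tree idx)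

-- ===== LEMMAS AND PROOFS =====

-- fuel monotonicity for A's parser
theorem pvHelperA_mono : ∀ (f : Nat) (t : String) (i : Int) (v : Int × String),
    pvHelperA f t i = some v → pvHelperA (f+1) t i = some v := by
  intro f
  induction f with
  | zero => intro t i v h; simp [pvHelperA] at h
  | succ f ih =>
    intro t i v h
    rw [pvHelperA] at h
    rw [pvHelperA]
    simp only [Option.bind_eq_some_iff] at h ⊢
    obtain ⟨c, hg, h⟩ := h
    refine ⟨c, hg, ?_⟩
    by_cases hc : c = 'x'
    · simp only [hc, ne_eq, not_true_eq_false, if_false] at h ⊢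
      simp only [Option.bind_eq_some_iff] at h ⊢
      obtain ⟨p0, h0, p1, h1, p2, h2, p3, h3, hv⟩ := h
      exact ⟨p0, ih _ _ _ h0, p1, ih _ _ _ h1, p2, ih _ _ _ h2, p3, ih _ _ _ h3, hv⟩
    · simpa [hc] using h

theorem pvHelperA_mono_le : ∀ (f f' : Nat), f ≤ f' → ∀ (t : String) (i : Int) (v : Int × String),
    pvHelperA f t i = some v → pvHelperA f' t i = some v := by
  intro f f' hle t i v h
  induction hle with
  | refl => exact h
  | step _ ih => exact pvHelperA_mono _ _ _ _ ih

-- progress: a successful parse consumes at least one character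
theorem pvHelperA_progress : ∀ (f : Nat) (t : String) (i j : Int) (s : String),
    pvHelperA f t i = some (j, s) → i < j := by
  intro f
  induction f with
  | zero => intro t i j s h; simp [pvHelperA] at h
  | succ f ih =>
    intro t i j s h
    rw [pvHelperA] at h
    simp only [Option.bind_eq_some_iff] at h
    obtain ⟨c, hg, h⟩ := h
    by_cases hc : c = 'x'
    · simp only [hc, ne_eq, not_true_eq_false, if_false, Option.bind_eq_some_iff] at h
      obtain ⟨p0, h0, p1, h1, p2, h2, p3, h3, hv⟩ := h
      have a0 := ih _ _ _ _ h0
      have a1 := ih _ _ _ _ h1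
      have a2 := ih _ _ _ _ h2
      have a3 := ih _ _ _ _ h3
      have : p3.1 = j := congrArg Prod.fst (Option.some.inj hv)
      omega
    · simp only [if_pos hc, Option.some.injEq, Prod.mk.injEq] at h
      omega

-- parse a sequence of k consecutive subtrees, returning the end index
def pvSeqA : Nat → Nat → String → Int → Option Int
  | 0, _, _, i => some i
  | k+1, f, t, i =>
    match pvHelperA f t i with
    | none => none
    | some (j, _) => pvSeqA k f t j

theorem pvSeqA_mono_le : ∀ (k : Nat) (f f' : Nat), f ≤ f' → ∀ (t : String) (i : Int) (j : Int),
    pvSeqA k f t i = some j → pvSeqA k f' t i = some j := by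
  intro k
  induction k with
  | zero => intro f f' _ t i j h; simpa [pvSeqA] using h
  | succ k ih =>
    intro f f' hle t i j h
    rw [pvSeqA] at h ⊢
    cases h0 : pvHelperA f t i with
    | none => rw [h0] at h; simp at h
    | some v =>
      obtain ⟨j0, s0⟩ := v
      rw [h0] at h
      rw [pvHelperA_mono_le f f' hle t i (j0, s0) h0]
      dsimp only at h ⊢
      exact ih f f' hle t j0 j h

theorem pvSeqA_split : ∀ (a b : Nat) (f : Nat) (t : String) (i : Int),
    pvSeqA (a + b) f t i = (pvSeqA a f t i).bind (fun j => pvSeqA b f t j) := by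
  intro a
  induction a with
  | zero => intro b f t i; simp [pvSeqA]
  | succ a ih =>
    intro b f t i
    have hn : a + 1 + b = (a + b) + 1 := by omega
    rw [hn, pvSeqA, pvSeqA]
    cases h0 : pvHelperA f t i with
    | none => simp
    | some v =>
      obtain ⟨j0, s0⟩ := v
      dsimp only [Option.bind]
      exact ih b f t j0

-- shift lemma for the weight sums
theorem pvS_shift (t : String) (i : Int) (m : Nat) :
    pvS t i (m+1) = pvW (PySem.Str.pyGet? t i) + pvS t (i+1) m := by
  unfold pvS
  rw [Finset.sum_range_succ']
  rw [add_comm]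
  congr 1
  · simp
  · apply Finset.sum_congr rfl
    intro x _
    congr 2
    push_cast
    ring

-- unfold a 4-subtree sequential parse into its chain of pvHelperA successes
theorem pvSeqA_four (f : Nat) (t : String) (j mm : Int) (h : pvSeqA 4 f t j = some mm) :
    ∃ p0 p1 p2 p3 : Int × String,
      pvHelperA f t j = some p0 ∧ pvHelperA f t p0.1 = some p1 ∧
      pvHelperA f t p1.1 = some p2 ∧ pvHelperA f t p2.1 = some p3 ∧ p3.1 = mm := by
  rw [pvSeqA] at h
  cases h0 : pvHelperA f t j with
  | none => rw [h0] at h; simp at h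
  | some p0 =>
    rw [h0] at h; obtain ⟨j0, s0⟩ := p0; dsimp only at h
    rw [pvSeqA] at h
    cases h1 : pvHelperA f t j0 with
    | none => rw [h1] at h; simp at h
    | some p1 =>
      rw [h1] at h; obtain ⟨j1, s1⟩ := p1; dsimp only at h
      rw [pvSeqA] at h
      cases h2 : pvHelperA f t j1 with
      | none => rw [h2] at h; simp at h
      | some p2 =>
        rw [h2] at h; obtain ⟨j2, s2⟩ := p2; dsimp only at h
        rw [pvSeqA] at h
        cases h3 : pvHelperA f t j2 with
        | none => rw [h3] at h; simp at h
        | some p3 =>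
          rw [h3] at h; obtain ⟨j3, s3⟩ := p3; dsimp only at h
          rw [pvSeqA] at h
          exact ⟨(j0,s0), (j1,s1), (j2,s2), (j3,s3), rfl, h1, h2, h3, by simpa using h⟩

-- the balance condition implies the k-subtree parse succeeds, consuming exactly n characters
theorem pvSeqA_success : ∀ (n : Nat) (k : Nat) (t : String) (i : Int),
    (∀ m : Nat, m < n → (PySem.Str.pyGet? t (i + (m : Int))).isSome = true) →
    (∀ m : Nat, m < n → 0 < (k : Int) + pvS t i m) →
    ((k : Int) + pvS t i n = 0) →
    ∀ f : Nat, n ≤ f → pvSeqA k f t i = some (i + (n : Int)) := by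
  intro n
  induction n using Nat.strong_induction_on with
  | _ n IH =>
    intro k t i hvalid hpos hzero f hf
    cases k with
    | zero =>
      have hn0 : n = 0 := by
        by_contra hne
        have h' := hpos 0 (Nat.pos_of_ne_zero hne)
        simp [pvS] at h'
      subst hn0
      simp [pvSeqA]
    | succ k' =>
      have hn : n ≠ 0 := by
        intro h0; subst h0
        have : ((k' + 1 : Nat) : Int) = 0 := by simpa [pvS] using hzero
        omega
      obtain ⟨n', rfl⟩ : ∃ n', n = n' + 1 := ⟨n - 1, by omega⟩
      obtain ⟨f', rfl⟩ : ∃ f', f = f' + 1 := ⟨f - 1, by omega⟩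
      have hv0 : (PySem.Str.pyGet? t i).isSome = true := by
        simpa using hvalid 0 (by omega)
      obtain ⟨c, hc⟩ := Option.isSome_iff_exists.mp hv0
      have hvalid' : ∀ m : Nat, m < n' → (PySem.Str.pyGet? t ((i+1) + (m : Int))).isSome = true := by
        intro m hm
        have h' := hvalid (m+1) (by omega)
        rw [show (i + ((m+1 : Nat) : Int)) = (i+1) + (m : Int) by push_cast; ring] at h'
        exact h'
      by_cases hcx : c = 'x'
      · -- internal node: one 'x' plus a (k'+4)-sequence from i+1
        have hkey : ∀ m : Nat, ((k' + 4 : Nat) : Int) + pvS t (i+1) m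
            = ((k' + 1 : Nat) : Int) + pvS t i (m+1) := by
          intro m
          rw [pvS_shift, hc]
          simp only [pvW, hcx]
          push_cast; ring
        have hpos' : ∀ m : Nat, m < n' → 0 < ((k' + 4 : Nat) : Int) + pvS t (i+1) m := by
          intro m hm; rw [hkey m]; exact hpos (m+1) (by omega)
        have hzero' : ((k' + 4 : Nat) : Int) + pvS t (i+1) n' = 0 := by
          rw [hkey n']; exact hzero
        have hseq := IH n' (by omega) (k' + 4) t (i+1) hvalid' hpos' hzero' f' (by omega)
        rw [show k' + 4 = 4 + k' from by omega, pvSeqA_split] at hseq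
        cases h4 : pvSeqA 4 f' t (i+1) with
        | none => rw [h4] at hseq; simp at hseq
        | some mm =>
          rw [h4] at hseq; dsimp only [Option.bind] at hseq
          obtain ⟨p0, p1, p2, p3, h0, h1, h2, h3, hp3⟩ := pvSeqA_four f' t (i+1) mm h4
          have hA : pvHelperA (f'+1) t i = some (mm, "x" ++ (p2.2 ++ p3.2 ++ p0.2 ++ p1.2)) := by
            rw [pvHelperA, hc]
            simp [hcx, h0, h1, h2, h3, hp3]
          rw [pvSeqA, hA]
          dsimp only
          have := pvSeqA_mono_le k' f' (f'+1) (by omega) t mm (i + 1 + (n' : Int)) hseq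
          rw [this]
          congr 1
          push_cast; ring
      · -- leaf: one character, then a k'-sequence from i+1
        have hA : pvHelperA (f'+1) t i = some (i + 1, String.ofList [c]) := by
          rw [pvHelperA, hc]
          simp [hcx]
        have hkey : ∀ m : Nat, ((k' : Nat) : Int) + pvS t (i+1) m
            = ((k' + 1 : Nat) : Int) + pvS t i (m+1) := by
          intro m
          rw [pvS_shift, hc]
          simp only [pvW, hcx]
          push_cast; ring
        have hpos' : ∀ m : Nat, m < n' → 0 < ((k' : Nat) : Int) + pvS t (i+1) m := by
          intro m hm; rw [hkey m]; exact hpos (m+1) (by omega)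
        have hzero' : ((k' : Nat) : Int) + pvS t (i+1) n' = 0 := by
          rw [hkey n']; exact hzero
        have hseq := IH n' (by omega) k' t (i+1) hvalid' hpos' hzero' f' (by omega)
        rw [pvSeqA, hA]
        dsimp only
        have := pvSeqA_mono_le k' f' (f'+1) (by omega) t (i+1) (i + 1 + (n' : Int)) hseq
        rw [this]
        congr 1
        push_cast; ring

-- B simulates A in continuation style: after A parses one subtree (i → j, string s),
-- B's loop attaches s to the current stack and continues with the remaining fuel
theorem pvLoopB_sim : ∀ (f : Nat) (t : String) (i j : Int) (s : String),
    pvHelperA f t i = some (j, s) →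
    ∀ (stack : List (List String)) (k : Nat),
      pvLoopB ((j - i).toNat + k) t i stack =
        (match pvAttachB s stack with
         | Sum.inl r => some (j, r)
         | Sum.inr st => pvLoopB k t j st) := by
  intro f
  induction f with
  | zero => intro t i j s h; simp [pvHelperA] at h
  | succ f ih =>
    intro t i j s h stack k
    rw [pvHelperA] at h
    simp only [Option.bind_eq_some_iff] at h
    obtain ⟨c, hg, h⟩ := h
    by_cases hc : c = 'x'
    · subst hc
      simp only [ne_eq, not_true_eq_false, if_false, Option.bind_eq_some_iff] at h
      obtain ⟨⟨j0, s0⟩, h0, ⟨j1, s1⟩, h1, ⟨j2, s2⟩, h2, ⟨j3, s3⟩, h3, hv⟩ := h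
      simp only [Option.some.injEq, Prod.mk.injEq] at hv
      obtain ⟨hj, hs⟩ := hv
      subst hj; subst hs
      have a0 := pvHelperA_progress f t (i+1) j0 s0 h0
      have a1 := pvHelperA_progress f t j0 j1 s1 h1
      have a2 := pvHelperA_progress f t j1 j2 s2 h2
      have a3 := pvHelperA_progress f t j2 j3 s3 h3
      rw [show (j3 - i).toNat + k = ((j3 - (i+1)).toNat + k) + 1 by omega]
      rw [pvLoopB, hg]
      dsimp only [Option.bind]
      rw [if_pos rfl]
      rw [show (j3 - (i+1)).toNat + k
            = (j0 - (i+1)).toNat + ((j1 - j0).toNat + ((j2 - j1).toNat + ((j3 - j2).toNat + k)))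
          by omega]
      rw [ih t (i+1) j0 s0 h0 ([] :: stack) _]
      simp only [pvAttachB, List.nil_append]
      rw [ih t j0 j1 s1 h1 ([s0] :: stack) _]
      simp only [pvAttachB, List.cons_append, List.nil_append]
      rw [ih t j1 j2 s2 h2 ([s0, s1] :: stack) _]
      simp only [pvAttachB, List.cons_append, List.nil_append]
      rw [ih t j2 j3 s3 h3 ([s0, s1, s2] :: stack) _]
      simp only [pvAttachB]
    · rw [if_pos hc] at h
      simp only [Option.some.injEq, Prod.mk.injEq] at h
      obtain ⟨hj, hs⟩ := h
      subst hj; subst hs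
      rw [show (i + 1 - i).toNat + k = k + 1 by omega]
      rw [pvLoopB, hg]
      dsimp only [Option.bind]
      rw [if_neg hc]

-- ===== VERDICT (by name: the statement is the Claim_ definition above) =====
theorem FlipTree_spec : Claim_equal_FlipTree := by
  intro tree idx _ hpre
  obtain ⟨n, hn, hvalid, hpos, hzero⟩ := hpre
  have hseq := pvSeqA_success n 1 tree idx hvalid (by simpa using hpos) (by simpa using hzero)
      (2 * tree.length + 1) (by omega)
  rw [pvSeqA] at hseq
  cases hA : pvHelperA (2 * tree.length + 1) tree idx with
  | none => rw [hA] at hseq; simp at hseq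
  | some p =>
    obtain ⟨j, s⟩ := p
    rw [hA] at hseq
    dsimp only at hseq
    rw [pvSeqA] at hseq
    have hj : j = idx + (n : Int) := by simpa using hseq
    have hB := pvLoopB_sim (2 * tree.length + 1) tree idx j s hA []
        (2 * tree.length + 1 - (j - idx).toNat)
    have htn : (j - idx).toNat = n := by omega
    rw [show (j - idx).toNat + (2 * tree.length + 1 - (j - idx).toNat)
          = 2 * tree.length + 1 by omega] at hB
    simp only [pvAttachB] at hB
    unfold Spec_FlipTree FlipTree FlipTree_alt
    rw [hA, hB]
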